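-- pv_equiv track=rewrite | github.com/LOCSautomation/url-status-checker | url-status-checker.py | _scrub_history_lines
-- ===== SOURCE A (Python) =====
-- from typing import Dict, List, Optional, Tuple
--
-- def _scrub_history_lines(lines: List[str], sensitive_tokens: List[str]) -> List[str]:
--     if not sensitive_tokens:
--         return lines
--     filtered: List[str] = []
--     for line in lines:
--         try:
--             if any(token and token in line for token in sensitive_tokens):
--                 # Skip lines containing sensitive info
--                 continue
--         except Exception:
--             pass
--         filtered.append(line)
--     return filtered
-- ===== SOURCE B (Python) =====
-- from typing import List
--
--
-- def _scrub_history_lines(lines: List[str], sensitive_tokens: List[str]) -> List[str]: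
--     kept = lines
--     for token in sensitive_tokens:
--         if token:
--             kept = [line for line in kept if token not in line]
--     return kept
-- ===== Notes on version B (the rewrite author's own statement) =====
-- stated objective: alternative
-- what changed: B swaps the loop nesting: instead of A's line-major loop that runs any(token in line) over all tokens for every line, B filters token-major, successively shrinking the kept list once per non-empty token, so the per-line inner any() scan disappears.
import Mathlib
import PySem

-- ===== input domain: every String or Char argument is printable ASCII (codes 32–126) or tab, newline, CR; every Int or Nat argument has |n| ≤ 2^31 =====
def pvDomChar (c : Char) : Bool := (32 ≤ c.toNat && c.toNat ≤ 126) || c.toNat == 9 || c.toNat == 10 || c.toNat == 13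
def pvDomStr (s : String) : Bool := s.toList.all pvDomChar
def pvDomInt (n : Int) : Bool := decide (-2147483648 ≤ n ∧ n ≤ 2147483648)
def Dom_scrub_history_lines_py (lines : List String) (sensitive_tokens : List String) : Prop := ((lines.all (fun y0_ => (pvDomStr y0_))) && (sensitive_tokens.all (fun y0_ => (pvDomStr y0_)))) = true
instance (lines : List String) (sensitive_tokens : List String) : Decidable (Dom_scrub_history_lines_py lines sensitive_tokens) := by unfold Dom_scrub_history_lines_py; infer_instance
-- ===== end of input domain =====

-- B filters token-major (one successive filter of the kept list per non-empty token)
-- instead of A's line-major loop with a per-line any() over the tokens; same results.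

-- ===== PORT A =====
-- literal transliteration of A: early return on empty token list, then an append-accumulator
-- loop skipping lines where any non-empty token occurs as a substring (the try/except never fires)
def scrub_history_lines_py (lines : List String) (sensitive_tokens : List String) : List String :=
  if sensitive_tokens = [] then lines
  else
    lines.foldl
      (fun filtered line =>
        if sensitive_tokens.any (fun token => (!token.toList.isEmpty) && PySem.Str.isIn token line)
        then filtered
        else filtered ++ [line])
      []

-- ===== PORT B =====
-- kept = lines; for token in sensitive_tokens: if token: kept = [l for l in kept if token not in l]
def scrub_history_lines_py_alt (lines : List String) (sensitive_tokens : List String) : List String :=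
  sensitive_tokens.foldl
    (fun kept token =>
      if token.toList.isEmpty then kept
      else kept.filter (fun line => !PySem.Str.isIn token line))
    lines

-- ===== PRECONDITION & SPEC =====
def Spec_scrub_history_lines_py (lines : List String) (sensitive_tokens : List String) (out : List String) : Prop := out = scrub_history_lines_py_alt lines sensitive_tokens
instance (lines : List String) (sensitive_tokens : List String) (out : List String) : Decidable (Spec_scrub_history_lines_py lines sensitive_tokens out) := by unfold Spec_scrub_history_lines_py; infer_instance

-- ===== CLAIM (what is proved, stated in full; the proofs are below) =====
def Claim_equal_scrub_history_lines_py : Prop := ∀ (lines : List String) (sensitive_tokens : List String), Dom_scrub_history_lines_py lines sensitive_tokens → Spec_scrub_history_lines_py lines sensitive_tokens (scrub_history_lines_py lines sensitive_tokens)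

-- ===== LEMMAS AND PROOFS =====

-- B's successive filters amount to one filter of "no non-empty token occurs in the line"
theorem alt_eq_filter (sensitive_tokens : List String) (lines : List String) :
    scrub_history_lines_py_alt lines sensitive_tokens
      = lines.filter (fun line =>
          !sensitive_tokens.any (fun token => (!token.toList.isEmpty) && PySem.Str.isIn token line)) := by
  induction sensitive_tokens generalizing lines with
  | nil => simp [scrub_history_lines_py_alt]
  | cons t ts ih =>
      unfold scrub_history_lines_py_alt at ih ⊢
      simp only [List.foldl_cons]
      by_cases ht : t.toList.isEmpty
      · rw [if_pos ht, ih]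
        apply List.filter_congr
        intro line _
        simp [ht]
      · rw [if_neg ht, ih, List.filter_filter]
        apply List.filter_congr
        intro line _
        simp [ht, Bool.and_comm]

theorem scrub_eq (lines : List String) (sensitive_tokens : List String) :
    scrub_history_lines_py lines sensitive_tokens
      = scrub_history_lines_py_alt lines sensitive_tokens := by
  rw [alt_eq_filter]
  unfold scrub_history_lines_py
  by_cases h0 : sensitive_tokens = []
  · subst h0; simp
  · simp only [if_neg h0]
    have hfun : (fun (filtered : List String) line =>
        if sensitive_tokens.any (fun token => (!token.toList.isEmpty) && PySem.Str.isIn token line)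
        then filtered else filtered ++ [line])
        = (fun acc x =>
            if (fun line => !sensitive_tokens.any
                  (fun token => (!token.toList.isEmpty) && PySem.Str.isIn token line)) x = true
            then acc ++ [id x] else acc) := by
      funext acc x
      rcases h : sensitive_tokens.any
          (fun token => (!token.toList.isEmpty) && PySem.Str.isIn token x) with _ | _ <;>
        simp only [h, Bool.not_false, Bool.not_true, if_true, id] <;> simp
    rw [hfun, PySem.List.foldl_append_if, List.map_id, List.nil_append]

-- ===== VERDICT (by name: the statement is the Claim_ definition above) =====
theorem scrub_history_lines_py_spec : Claim_equal_scrub_history_lines_py := by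
  intro lines sensitive_tokens _
  exact scrub_eq lines sensitive_tokens
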